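-- pv_equiv track=rewrite | github.com/linneszyx/CP-Problems | Easy/Maximize sum(arr[i]*i) of an Array/maximize-sumarrii-of-an-array.py | Maximize
-- ===== SOURCE A (Python) =====
-- def Maximize(a, n):
--     # Complete the function
--     k = []
--     a.sort()
--     for i in range(len(a)):
--         k.append(a[i]*i)
--     l = sum(k)
--     l=l%(10**9+7)
--     return l
-- ===== SOURCE B (Python) =====
-- def Maximize(a, n):
--     # Sort in place (same mutation as A), then one forward pass over the elements
--     # maintaining the running prefix total p and the sum of all prefix totals sp.
--     # Identity: sum(i*a[i]) = len(a)*sum(a) - sum_of_prefix_sums(a).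
--     a.sort()
--     p = 0
--     sp = 0
--     for x in a:
--         p += x
--         sp += p
--     return (len(a) * p - sp) % (10**9 + 7)
-- ===== Notes on version B (the rewrite author's own statement) =====
-- stated objective: alternative
-- what changed: Replaces A's index-product list (k.append(a[i]*i) over range(len(a)), then sum and mod) by a single forward element-wise pass maintaining the running prefix total and the sum of all prefix totals, returning (len(a)*total - sum_of_prefixes) mod 1e9+7 via the identity sum(i*a[i]) = n*sum(a) - sum of prefix sums; no index arithmetic at all.
import Mathlib
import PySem

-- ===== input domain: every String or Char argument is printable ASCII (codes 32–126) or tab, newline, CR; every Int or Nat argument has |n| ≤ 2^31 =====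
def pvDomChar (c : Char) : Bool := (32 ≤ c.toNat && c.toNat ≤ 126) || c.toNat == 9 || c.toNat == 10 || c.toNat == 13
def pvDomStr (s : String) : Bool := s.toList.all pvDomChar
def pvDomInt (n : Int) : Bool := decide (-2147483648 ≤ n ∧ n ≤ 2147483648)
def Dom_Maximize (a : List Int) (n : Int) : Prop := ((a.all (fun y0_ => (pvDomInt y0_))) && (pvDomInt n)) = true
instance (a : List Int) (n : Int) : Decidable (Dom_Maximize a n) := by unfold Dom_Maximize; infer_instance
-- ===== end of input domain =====

-- B drops all index arithmetic: one forward element pass keeping the running prefix total and the sum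
-- of prefix totals, with n*sum - sum_of_prefixes at the end; equivalence is about the RETURN value only
-- (both Pythons sort `a` in place the same way, so the caller-visible mutation also agrees).

-- ===== PORT A =====
-- literal port of A: sort, build k = [a[i]*i for i in range(len(a))] by appending, sum, mod
def Maximize (a : List Int) (n : Int) : Int :=
  let srt := PySem.List.sorted a (fun x => x) false
  let k := (PySem.List.pyRange 0 (srt.length : Int) 1).foldl
             (fun k i => k ++ [PySem.List.pyGetD srt i 0 * i]) []
  let l := k.sum
  PySem.Int.mod l (10 ^ 9 + 7)

-- ===== PORT B =====
-- literal port of B: sort, then fold over the elements themselves with state (p, sp)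
def Maximize_alt (a : List Int) (n : Int) : Int :=
  let srt := PySem.List.sorted a (fun x => x) false
  let st := srt.foldl (fun (st : Int × Int) x => (st.1 + x, st.2 + (st.1 + x))) (0, 0)
  PySem.Int.mod ((srt.length : Int) * st.1 - st.2) (10 ^ 9 + 7)

-- ===== PRECONDITION & SPEC =====
def Spec_Maximize (a : List Int) (n : Int) (out : Int) : Prop := out = Maximize_alt a n
instance (a : List Int) (n : Int) (out : Int) : Decidable (Spec_Maximize a n out) := by unfold Spec_Maximize; infer_instance

-- ===== CLAIM (what is proved, stated in full; the proofs are below) =====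
def Claim_equal_Maximize : Prop := ∀ (a : List Int) (n : Int), Dom_Maximize a n → Spec_Maximize a n (Maximize a n)

-- ===== LEMMAS AND PROOFS =====

-- pvG l k = Σ_{i<k} i * l[i]
def pvG (l : List Int) : Nat → Int
  | 0 => 0
  | k + 1 => pvG l k + (k : Int) * l.getD k 0

-- sum of the k-prefix-sums of l, recursively
def pvSP : List Int → Int
  | [] => 0
  | x :: xs => ((xs.length : Int) + 1) * x + pvSP xs

theorem pvA_sum (l : List Int) (m : Nat) :
    ((PySem.List.pyRange 0 (m : Int) 1).map (fun i => PySem.List.pyGetD l i 0 * i)).sum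
      = pvG l m := by
  induction m with
  | zero => simp [PySem.List.pyRange_one_eq_nil, pvG]
  | succ m ih =>
    have h : ((m + 1 : Nat) : Int) = (m : Int) + 1 := by push_cast; ring
    rw [h, PySem.List.pyRange_one_succ_right (by positivity)]
    simp only [List.map_append, List.map_cons, List.map_nil, List.sum_append,
      List.sum_cons, List.sum_nil, ih, pvG, PySem.List.pyGetD_natCast]
    ring

theorem pvTake_succ_sum (xs : List Int) (k : Nat) :
    (xs.take (k + 1)).sum = (xs.take k).sum + xs.getD k 0 := by
  induction xs generalizing k with
  | nil => simp
  | cons x xs ih =>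
    cases k with
    | zero => simp
    | succ k => simp only [List.take_succ_cons, List.sum_cons, List.getD_cons_succ, ih]; ring

theorem pvG_cons (x : Int) (xs : List Int) (k : Nat) :
    pvG (x :: xs) (k + 1) = pvG xs k + (xs.take k).sum := by
  induction k with
  | zero => simp [pvG]
  | succ k ih =>
    have h1 : pvG (x :: xs) (k + 1 + 1)
        = pvG (x :: xs) (k + 1) + ((k + 1 : Nat) : Int) * (x :: xs).getD (k + 1) 0 := rfl
    have h2 : pvG xs (k + 1) = pvG xs k + (k : Int) * xs.getD k 0 := rfl
    rw [h1, h2, ih, List.getD_cons_succ, pvTake_succ_sum]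
    push_cast; ring

theorem pvG_eq (l : List Int) :
    pvG l l.length = (l.length : Int) * l.sum - pvSP l := by
  induction l with
  | nil => simp [pvG, pvSP]
  | cons x xs ih =>
    rw [List.length_cons, pvG_cons, List.take_length, ih]
    simp only [pvSP, List.sum_cons, List.length_cons]
    push_cast; ring

theorem pvB_fold (l : List Int) (p sp : Int) :
    l.foldl (fun (st : Int × Int) x => (st.1 + x, st.2 + (st.1 + x))) (p, sp)
      = (p + l.sum, sp + (l.length : Int) * p + pvSP l) := by
  induction l generalizing p sp with
  | nil => simp [pvSP]
  | cons x xs ih =>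
    simp only [List.foldl_cons, ih, pvSP, List.sum_cons, List.length_cons, Prod.mk.injEq]
    constructor <;> (push_cast; ring)

-- ===== VERDICT (by name: the statement is the Claim_ definition above) =====
theorem Maximize_spec : Claim_equal_Maximize := by
  intro a n _
  unfold Spec_Maximize Maximize Maximize_alt
  simp only []
  set l := PySem.List.sorted a (fun x => x) false with hl
  rw [PySem.List.foldl_append_singleton_eq_map, List.nil_append, pvA_sum, pvB_fold, pvG_eq]
  ring_nf
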